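-- pv_equiv track=rewrite | github.com/plhosk/wordtracer | scripts/analyze_levels_bundle.py | solution_word_rows
-- ===== SOURCE A (Python) =====
-- def level_code(
--     level_id: str,
--     level_to_group_id: dict[str, str],
--     level_to_group_pos: dict[str, int],
-- ) -> str:
--     group_id = level_to_group_id.get(level_id, "?")
--     position = level_to_group_pos.get(level_id)
--     if position is not None:
--         return f"{group_id}{position}"
--     return f"{group_id}#{level_id}"
--
-- def solution_word_rows(
--     group_order: list[dict],
--     answer_words_by_level: dict[str, list[str]],
--     level_to_group_id: dict[str, str],
--     level_to_group_pos: dict[str, int],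
-- ) -> list[list[str]]:
--     rows: list[list[str]] = []
--     seen_level_ids: set[str] = set()
--
--     for group in group_order:
--         for raw_level_id in group.get("levelIds", []):
--             if not isinstance(raw_level_id, str):
--                 continue
--             level_id = raw_level_id
--             if level_id in seen_level_ids or level_id not in answer_words_by_level:
--                 continue
--             seen_level_ids.add(level_id)
--             level_words = answer_words_by_level.get(level_id, [])
--             rows.append(
--                 [
--                     level_code(level_id, level_to_group_id, level_to_group_pos),
--                     *level_words,
--                 ]
--             )
--
--     for level_id in sorted(answer_words_by_level):
--         if level_id in seen_level_ids:
--             continue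
--         rows.append(
--             [
--                 level_code(level_id, level_to_group_id, level_to_group_pos),
--                 *answer_words_by_level.get(level_id, []),
--             ]
--         )
--
--     return rows
-- ===== SOURCE B (Python) =====
-- def solution_word_rows(
--     group_order,
--     answer_words_by_level,
--     level_to_group_id,
--     level_to_group_pos,
-- ):
--     # Schedule-by-key: instead of traversing with a seen-set and patching in the
--     # leftovers, give every level id a numeric rank (its first-occurrence index in
--     # the flattened group order, or len(flat) if absent) and obtain the whole row
--     # order as ONE sort of the dict keys by (rank, id); then render each row.
--     flat = [lid
--             for group in group_order
--             for lid in group.get("levelIds", [])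
--             if isinstance(lid, str)]
--     first = {}
--     for i, lid in enumerate(flat):
--         first.setdefault(lid, i)
--     sentinel = len(flat)
--     ordered = sorted(answer_words_by_level, key=lambda k: (first.get(k, sentinel), k))
--
--     def render(lid):
--         gid = level_to_group_id.get(lid, "?")
--         pos = level_to_group_pos.get(lid)
--         code = f"{gid}{pos}" if pos is not None else f"{gid}#{lid}"
--         return [code, *answer_words_by_level.get(lid, [])]
--
--     return [render(lid) for lid in ordered]
-- ===== Notes on version B (the rewrite author's own statement) =====
-- stated objective: alternative
-- what changed: A traverses the groups building rows while maintaining a seen-set and then appends the leftover keys in sorted order; B never tracks seenness or builds rows during traversal: it assigns every level id a numeric rank (first-occurrence index in the flattened group order, len(flat) if absent) and produces the whole row order as one sort of the dict keys under the tuple key (rank, id), then renders each row.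
import Mathlib
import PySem

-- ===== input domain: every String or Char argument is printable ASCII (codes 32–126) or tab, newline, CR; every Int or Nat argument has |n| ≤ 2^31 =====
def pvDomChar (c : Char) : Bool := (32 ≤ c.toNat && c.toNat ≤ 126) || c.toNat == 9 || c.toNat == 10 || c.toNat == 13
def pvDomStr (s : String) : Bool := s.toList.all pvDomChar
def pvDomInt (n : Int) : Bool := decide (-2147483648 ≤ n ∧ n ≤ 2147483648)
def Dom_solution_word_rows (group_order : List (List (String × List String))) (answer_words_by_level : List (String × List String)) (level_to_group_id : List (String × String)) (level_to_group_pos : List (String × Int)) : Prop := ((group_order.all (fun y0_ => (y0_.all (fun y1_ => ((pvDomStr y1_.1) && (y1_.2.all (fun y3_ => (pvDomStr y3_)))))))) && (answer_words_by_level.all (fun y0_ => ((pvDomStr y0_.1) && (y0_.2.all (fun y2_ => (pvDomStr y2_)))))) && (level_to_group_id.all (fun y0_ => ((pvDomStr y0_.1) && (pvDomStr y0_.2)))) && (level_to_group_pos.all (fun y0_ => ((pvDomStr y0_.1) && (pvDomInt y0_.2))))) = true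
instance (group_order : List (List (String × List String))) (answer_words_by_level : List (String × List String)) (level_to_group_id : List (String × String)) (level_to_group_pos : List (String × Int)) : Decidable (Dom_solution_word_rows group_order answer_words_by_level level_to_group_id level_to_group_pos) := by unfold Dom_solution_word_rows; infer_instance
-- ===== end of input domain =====

-- B replaces A's seen-set traversal plus sorted-leftover pass by ONE sort of the dict keys under a
-- computed (first-occurrence rank, id) key; alternative decomposition, no speed claim.

-- ===== PORT A =====
-- port of the module helper `level_code`
def pv_level_code (level_id : String) (level_to_group_id : PySem.Dict String String) (level_to_group_pos : PySem.Dict String Int) : String :=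
  let group_id := level_to_group_id.getD level_id "?"
  match level_to_group_pos.get? level_id with
  | some position => group_id ++ PySem.Int.toStr position
  | none => group_id ++ "#" ++ level_id

def solution_word_rows (group_order : List (List (String × List String))) (answer_words_by_level : List (String × List String)) (level_to_group_id : List (String × String)) (level_to_group_pos : List (String × Int)) : List (List String) :=
  let awbl := PySem.Dict.ofList answer_words_by_level
  let ltgi := PySem.Dict.ofList level_to_group_id
  let ltgp := PySem.Dict.ofList level_to_group_pos
  -- first loop: rows and seen_level_ids evolve together (the isinstance(str) test is always true at this type)
  let st := group_order.foldl
    (fun (st : List (List String) × PySem.Set String) group =>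
      ((PySem.Dict.ofList group).getD "levelIds" []).foldl
        (fun st level_id =>
          if PySem.Set.contains st.2 level_id || !awbl.contains level_id then st
          else (st.1 ++ [pv_level_code level_id ltgi ltgp :: awbl.getD level_id []],
                PySem.Set.add st.2 level_id))
        st)
    ([], PySem.Set.empty)
  -- second loop: sorted(answer_words_by_level) = sorted dict keys
  (PySem.List.sorted awbl.keys (fun x => x) false).foldl
    (fun rows level_id =>
      if PySem.Set.contains st.2 level_id then rows
      else rows ++ [pv_level_code level_id ltgi ltgp :: awbl.getD level_id []])
    st.1

-- ===== PORT B =====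
def solution_word_rows_alt (group_order : List (List (String × List String))) (answer_words_by_level : List (String × List String)) (level_to_group_id : List (String × String)) (level_to_group_pos : List (String × Int)) : List (List String) :=
  let awbl := PySem.Dict.ofList answer_words_by_level
  let ltgi := PySem.Dict.ofList level_to_group_id
  let ltgp := PySem.Dict.ofList level_to_group_pos
  -- flat = [lid for group in group_order for lid in group.get("levelIds", [])]  (isinstance(str) is a no-op at this type)
  let flat := (group_order.map (fun group => (PySem.Dict.ofList group).getD "levelIds" [])).flatten
  -- first.setdefault(lid, i) over enumerate(flat)
  let first := (PySem.List.enumerate flat 0).foldl (fun d (p : Int × String) => d.setdefault p.2 p.1) PySem.Dict.empty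
  let sentinel : Int := PySem.List.len flat
  -- one sort of the keys by the tuple key (first.get(k, sentinel), k)
  let ordered := PySem.List.sorted2 awbl.keys (fun k => first.getD k sentinel) (fun k => k) false
  -- render(lid) for lid in ordered
  ordered.map (fun lid =>
    let gid := ltgi.getD lid "?"
    let code := match ltgp.get? lid with
      | some pos => gid ++ PySem.Int.toStr pos
      | none => gid ++ "#" ++ lid
    code :: awbl.getD lid [])

-- ===== PRECONDITION & SPEC =====
def Spec_solution_word_rows (group_order : List (List (String × List String))) (answer_words_by_level : List (String × List String)) (level_to_group_id : List (String × String)) (level_to_group_pos : List (String × Int)) (out : List (List String)) : Prop := out = solution_word_rows_alt group_order answer_words_by_level level_to_group_id level_to_group_pos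
instance (group_order : List (List (String × List String))) (answer_words_by_level : List (String × List String)) (level_to_group_id : List (String × String)) (level_to_group_pos : List (String × Int)) (out : List (List String)) : Decidable (Spec_solution_word_rows group_order answer_words_by_level level_to_group_id level_to_group_pos out) := by unfold Spec_solution_word_rows; infer_instance

-- ===== CLAIM (what is proved, stated in full; the proofs are below) =====
def Claim_equal_solution_word_rows : Prop := ∀ (group_order : List (List (String × List String))) (answer_words_by_level : List (String × List String)) (level_to_group_id : List (String × String)) (level_to_group_pos : List (String × Int)), Dom_solution_word_rows group_order answer_words_by_level level_to_group_id level_to_group_pos → Spec_solution_word_rows group_order answer_words_by_level level_to_group_id level_to_group_pos (solution_word_rows group_order answer_words_by_level level_to_group_id level_to_group_pos)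

-- ===== LEMMAS AND PROOFS =====

-- A's first loop only appends to the ordered list: shift the accumulator out.
lemma pvB_shift (awbl : PySem.Dict String (List String)) (lids : List String) (ord : List String) (seen : PySem.Set String) :
    lids.foldl (fun st lid => if awbl.contains lid && !PySem.Set.contains st.2 lid then (st.1 ++ [lid], PySem.Set.add st.2 lid) else st) (ord, seen)
      = (ord ++ (lids.foldl (fun st lid => if awbl.contains lid && !PySem.Set.contains st.2 lid then (st.1 ++ [lid], PySem.Set.add st.2 lid) else st) ([], seen)).1,
         (lids.foldl (fun st lid => if awbl.contains lid && !PySem.Set.contains st.2 lid then (st.1 ++ [lid], PySem.Set.add st.2 lid) else st) ([], seen)).2) := by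
  induction lids generalizing ord seen with
  | nil => simp
  | cons x t ih =>
    simp only [List.foldl_cons, List.nil_append]
    cases h : awbl.contains x && !PySem.Set.contains seen x
    · rw [if_neg (by simp), if_neg (by simp)]
      exact ih ord seen
    · rw [if_pos rfl, if_pos rfl]
      rw [ih (ord ++ [x]) (PySem.Set.add seen x), ih [x] (PySem.Set.add seen x)]
      simp

-- A's first loop over one list of level ids equals "render the collected prefix".
lemma pvAB (awbl : PySem.Dict String (List String)) (render : String → List String) (lids : List String) (rows : List (List String)) (seen : PySem.Set String) :
    lids.foldl (fun st lid => if PySem.Set.contains st.2 lid || !awbl.contains lid then st else (st.1 ++ [render lid], PySem.Set.add st.2 lid)) (rows, seen)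
      = (rows ++ ((lids.foldl (fun st lid => if awbl.contains lid && !PySem.Set.contains st.2 lid then (st.1 ++ [lid], PySem.Set.add st.2 lid) else st) ([], seen)).1).map render,
         (lids.foldl (fun st lid => if awbl.contains lid && !PySem.Set.contains st.2 lid then (st.1 ++ [lid], PySem.Set.add st.2 lid) else st) ([], seen)).2) := by
  induction lids generalizing rows seen with
  | nil => simp
  | cons x t ih =>
    simp only [List.foldl_cons, List.nil_append]
    by_cases hTake : (awbl.contains x && !PySem.Set.contains seen x) = true
    · rw [if_neg (by simp_all), if_pos hTake]
      rw [ih (rows ++ [render x]) (PySem.Set.add seen x), pvB_shift awbl t [x] (PySem.Set.add seen x)]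
      simp
    · rw [if_pos (by revert hTake; cases awbl.contains x <;> cases PySem.Set.contains seen x <;> simp), if_neg hTake]
      exact ih rows seen

-- the paired (collected, seen) fold started from equal components is one Set.add fold, twice
lemma pvPair (c : String → Bool) (l : List String) (s : PySem.Set String) :
    l.foldl (fun (st : List String × PySem.Set String) lid =>
        if c lid && !PySem.Set.contains st.2 lid then (st.1 ++ [lid], PySem.Set.add st.2 lid) else st) (s, s)
      = (l.foldl (fun t lid => if c lid then PySem.Set.add t lid else t) s,
         l.foldl (fun t lid => if c lid then PySem.Set.add t lid else t) s) := by
  induction l generalizing s with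
  | nil => rfl
  | cons x t ih =>
    simp only [List.foldl_cons]
    by_cases hc : c x = true
    · by_cases hm : x ∈ s
      · rw [if_neg (by simp [hc, hm]), if_pos hc]
        have hadd : PySem.Set.add s x = s := by simp [PySem.Set.add, hm]
        rw [hadd]; exact ih s
      · rw [if_pos (by simp [hc, hm]), if_pos hc]
        have hadd : PySem.Set.add s x = s ++ [x] := by simp [PySem.Set.add, hm]
        rw [← hadd]; exact ih (PySem.Set.add s x)
    · rw [if_neg (by simp [hc]), if_neg hc]; exact ih s

-- filter commutes with a Set.add fold
lemma pvFilterFold (c : String → Bool) (l : List String) (s : PySem.Set String) :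
    (l.foldl PySem.Set.add s).filter c = (l.filter c).foldl PySem.Set.add (s.filter c) := by
  induction l generalizing s with
  | nil => simp
  | cons x t ih =>
    simp only [List.foldl_cons, List.filter_cons]
    have hstep : (PySem.Set.add s x).filter c = if c x then PySem.Set.add (s.filter c) x else s.filter c := by
      by_cases hm : x ∈ s <;> by_cases hc2 : c x = true <;>
        simp [PySem.Set.add, hm, hc2, List.filter_append]
    by_cases hc : c x = true
    · simp only [hc, if_pos, List.foldl_cons]
      rw [ih (PySem.Set.add s x), hstep, if_pos hc]
    · simp only [hc]
      rw [ih (PySem.Set.add s x), hstep, if_neg hc]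
      simp

-- set(xs) lists first occurrences: strictly increasing first-occurrence indices
lemma pvIdxPairwise (l : List String) : (PySem.Set.ofList l).Pairwise (fun a b => l.idxOf a < l.idxOf b) := by
  induction l using List.reverseRecOn with
  | nil => exact List.Pairwise.nil
  | append_singleton l x ih =>
    have hof : PySem.Set.ofList (l ++ [x]) = PySem.Set.add (PySem.Set.ofList l) x := by
      rw [PySem.Set.ofList_eq_foldl, PySem.Set.ofList_eq_foldl, List.foldl_append]; rfl
    have hmem : ∀ a ∈ PySem.Set.ofList l, a ∈ l := fun a ha => by
      rw [PySem.Set.mem_ofList] at ha; exact ha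
    rw [hof]
    by_cases hx : x ∈ l
    · rw [show PySem.Set.add (PySem.Set.ofList l) x = PySem.Set.ofList l from by
        simp [PySem.Set.add, PySem.Set.mem_ofList, hx]]
      exact ih.imp_of_mem (fun {a b} ha hb h => by
        rw [List.idxOf_append_of_mem (hmem a ha), List.idxOf_append_of_mem (hmem b hb)]; exact h)
    · rw [show PySem.Set.add (PySem.Set.ofList l) x = PySem.Set.ofList l ++ [x] from by
        simp [PySem.Set.add, PySem.Set.mem_ofList, hx]]
      rw [List.pairwise_append]
      refine ⟨ih.imp_of_mem (fun {a b} ha hb h => by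
          rw [List.idxOf_append_of_mem (hmem a ha), List.idxOf_append_of_mem (hmem b hb)]; exact h),
        List.pairwise_singleton _ _, ?_⟩
      intro a ha b hb
      rw [List.mem_singleton] at hb; subst hb
      rw [List.idxOf_append_of_mem (hmem a ha), List.idxOf_append_of_notMem hx]
      have : l.idxOf a < l.length := List.idxOf_lt_length_of_mem (hmem a ha)
      simp [List.idxOf_cons_eq _ rfl]
      omega

-- the setdefault fold over enumerate(flat) records first-occurrence indices
lemma pvFirstGetD (flat : List String) (i : Int) (d : PySem.Dict String Int) (k : String) (s : Int) :
    ((PySem.List.enumerate flat i).foldl (fun d (p : Int × String) => d.setdefault p.2 p.1) d).getD k s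
      = if d.contains k then d.getD k s else if k ∈ flat then i + (flat.idxOf k : Int) else s := by
  induction flat generalizing i d with
  | nil =>
    simp only [PySem.List.enumerate_nil, List.foldl_nil, List.not_mem_nil, if_false]
    cases hd : d.contains k
    · cases hget : d.get? k with
      | none => simp [PySem.Dict.getD_eq_get?_getD, hget]
      | some v => rw [PySem.Dict.contains_eq_isSome_get?, hget] at hd; cases hd
    · simp
  | cons x t ih =>
    rw [PySem.List.enumerate_cons, List.foldl_cons, ih]
    by_cases hk : k = x
    · subst hk
      have hc : (d.setdefault k i).contains k = true := by
        simp [PySem.Dict.contains_setdefault]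
      rw [if_pos hc, PySem.Dict.getD_setdefault_self]
      cases hd : d.contains k
      · rw [if_neg (by simp), if_pos (List.mem_cons_self), List.idxOf_cons_eq _ rfl]
        cases hget : d.get? k with
        | none => simp [PySem.Dict.getD_eq_get?_getD, hget]
        | some v => rw [PySem.Dict.contains_eq_isSome_get?, hget] at hd; cases hd
      · rw [if_pos rfl]
        cases hget : d.get? k with
        | none => rw [PySem.Dict.contains_eq_isSome_get?, hget] at hd; cases hd
        | some v => simp [PySem.Dict.getD_eq_get?_getD, hget]
    · have hc : (d.setdefault x i).contains k = d.contains k := by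
        simp [PySem.Dict.contains_setdefault, hk]
      have hg : ∀ s', (d.setdefault x i).getD k s' = d.getD k s' := by
        intro s'
        rw [PySem.Dict.getD_eq_get?_getD, PySem.Dict.get?_setdefault_of_ne (hne := hk),
            ← PySem.Dict.getD_eq_get?_getD]
      rw [hc, hg]
      by_cases hd : d.contains k = true
      · rw [if_pos hd, if_pos hd]
      · rw [if_neg hd, if_neg hd]
        by_cases hmem : k ∈ t
        · rw [if_pos hmem, if_pos (List.mem_cons_of_mem _ hmem),
              List.idxOf_cons_ne _ (fun h => hk h.symm)]
          push_cast [Nat.succ_eq_add_one]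
          ring
        · rw [if_neg hmem, if_neg (by simp [hk, hmem])]

-- Python's tuple sort key (r k, k) is PySem's sorted2; it is a plain sort under the lexicographic order
lemma pvSorted2Lex (xs : List String) (r : String → Int) :
    PySem.List.sorted2 xs r (fun k => k) false
      = PySem.List.sorted xs (fun k => (toLex (r k, k) : Lex (Int × String))) false := by
  have h1 : PySem.List.sorted2 xs r (fun k => k) false
      = xs.foldl (fun acc x => PySem.List.insertBy
          (fun a b => decide (r a < r b) || (!decide (r b < r a) && decide (a < b))) x acc) [] := rfl
  have h2 : PySem.List.sorted xs (fun k => (toLex (r k, k) : Lex (Int × String))) false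
      = xs.foldl (fun acc x => PySem.List.insertBy
          (fun a b => decide ((toLex (r a, a) : Lex (Int × String)) < toLex (r b, b))) x acc) [] := rfl
  rw [h1, h2]
  have hb : (fun (a b : String) => decide (r a < r b) || (!decide (r b < r a) && decide (a < b)))
      = (fun (a b : String) => decide ((toLex (r a, a) : Lex (Int × String)) < toLex (r b, b))) := by
    funext a b
    rcases lt_trichotomy (r a) (r b) with h | h | h
    · simp [Prod.Lex.toLex_lt_toLex, h, lt_asymm h]
    · simp [Prod.Lex.toLex_lt_toLex, h]
    · simp [Prod.Lex.toLex_lt_toLex, h, lt_asymm h, h.ne']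
  rw [hb]

-- a stably sorted list filtered = the filtered list sorted
lemma pv_sorted_filter (keys : List String) (hnd : keys.Nodup) (p : String → Bool) :
    (PySem.List.sorted keys (fun x => x) false).filter p
      = PySem.List.sorted (keys.filter p) (fun x => x) false := by
  have hperm : ((PySem.List.sorted keys (fun x => x) false).filter p).Perm (keys.filter p) :=
    (PySem.List.sorted_perm keys (fun x => x) false).filter p
  have hnd' : (PySem.List.sorted keys (fun x => x) false).Nodup :=
    (PySem.List.sorted_perm keys (fun x => x) false).nodup_iff.mpr hnd
  have hle : (PySem.List.sorted keys (fun x => x) false).Pairwise (fun a b => a ≤ b) :=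
    PySem.List.sorted_pairwise keys (fun x => x)
  have hlt : (PySem.List.sorted keys (fun x => x) false).Pairwise (fun a b => a < b) := by
    have := hle.and hnd'
    exact this.imp (fun h => lt_of_le_of_ne h.1 h.2)
  exact (PySem.List.sorted_eq_of_perm_of_pairwise_lt (keys.filter p) _ (fun x => x) hperm (hlt.filter p)).symm

lemma pv_flip (seen : PySem.Set String) (f : String → List String) :
    (fun (rows : List (List String)) lid => if PySem.Set.contains seen lid = true then rows else rows ++ [f lid])
      = (fun rows lid => if (!PySem.Set.contains seen lid) = true then rows ++ [f lid] else rows) := by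
  funext r l
  cases PySem.Set.contains seen l
  · simp
  · simp

-- THE KEY FACT: one sort of the keys under the (rank, id) key reproduces
-- "group-order first occurrences, then the remaining keys sorted".
lemma pvMain (flat keys : List String) (c : String → Bool) (first : PySem.Dict String Int)
    (hnd : keys.Nodup)
    (hc : ∀ k, k ∈ keys ↔ c k = true)
    (hrank : ∀ k, first.getD k (flat.length : Int)
        = if k ∈ flat then (flat.idxOf k : Int) else (flat.length : Int)) :
    PySem.List.sorted2 keys (fun k => first.getD k (flat.length : Int)) (fun k => k) false
      = PySem.Set.ofList (flat.filter c)
        ++ PySem.List.sorted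
            (keys.filter (fun k => !PySem.Set.contains (PySem.Set.ofList (flat.filter c)) k))
            (fun x => x) false := by
  set ord := PySem.Set.ofList (flat.filter c) with hord
  set rest := PySem.List.sorted (keys.filter (fun k => !PySem.Set.contains ord k)) (fun x => x) false with hrest
  have hmemord : ∀ k, k ∈ ord ↔ (k ∈ flat ∧ c k = true) := by
    intro k; rw [hord, PySem.Set.mem_ofList, List.mem_filter]
  have hrestmem : ∀ k ∈ rest, k ∈ keys ∧ k ∉ ord := by
    intro k hk
    rw [hrest, PySem.List.mem_sorted, List.mem_filter] at hk
    refine ⟨hk.1, fun hmem => ?_⟩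
    have := hk.2
    simp [hmem] at this
  have hrestflat : ∀ k ∈ rest, k ∉ flat := by
    intro k hk hf
    exact (hrestmem k hk).2 ((hmemord k).mpr ⟨hf, (hc k).mp (hrestmem k hk).1⟩)
  rw [pvSorted2Lex]
  apply PySem.List.sorted_eq_of_perm_of_pairwise_lt
  · -- permutation
    have h1 : ord.Perm (keys.filter (fun k => PySem.Set.contains ord k)) := by
      apply (List.perm_ext_iff_of_nodup ?_ ?_).mpr
      · intro x
        constructor
        · intro hx
          rw [List.mem_filter]
          exact ⟨(hc x).mpr ((hmemord x).mp hx).2, by simp [hx]⟩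
        · intro hx
          rw [List.mem_filter] at hx
          have := hx.2
          simpa using this
      · rw [hord]; exact PySem.Set.nodup_ofList _
      · exact hnd.filter _
    have h2 : rest.Perm (keys.filter (fun k => !PySem.Set.contains ord k)) :=
      PySem.List.sorted_perm _ _ _
    exact (h1.append h2).trans (List.filter_append_perm _ keys)
  · -- strict pairwise under the lexicographic key
    rw [List.pairwise_append]
    refine ⟨?_, ?_, ?_⟩
    · -- within the group-order part: ranks strictly increase
      have hordeq : List.filter c (PySem.Set.ofList flat) = ord := by
        rw [hord, PySem.Set.ofList_eq_foldl, PySem.Set.ofList_eq_foldl, pvFilterFold]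
        rfl
      have hpw : ord.Pairwise (fun a b => flat.idxOf a < flat.idxOf b) := by
        have := (pvIdxPairwise flat).filter c
        rwa [hordeq] at this
      exact hpw.imp_of_mem (fun {a b} ha hb h => by
        rw [Prod.Lex.toLex_lt_toLex]
        left
        rw [hrank a, hrank b, if_pos ((hmemord a).mp ha).1, if_pos ((hmemord b).mp hb).1]
        dsimp only
        exact_mod_cast h)
    · -- within the remainder: ranks equal, ids strictly increase
      have hnd' : rest.Nodup := (PySem.List.sorted_perm _ _ _).nodup_iff.mpr (hnd.filter _)
      have hle : rest.Pairwise (fun a b => a ≤ b) := PySem.List.sorted_pairwise _ _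
      have hlt : rest.Pairwise (fun a b => a < b) :=
        (hle.and hnd').imp (fun h => lt_of_le_of_ne h.1 h.2)
      exact hlt.imp_of_mem (fun {a b} ha hb h => by
        rw [Prod.Lex.toLex_lt_toLex]
        right
        rw [hrank a, hrank b, if_neg (hrestflat a ha), if_neg (hrestflat b hb)]
        exact ⟨rfl, h⟩)
    · -- across: every group-order key ranks below every remaining key
      intro a ha b hb
      rw [Prod.Lex.toLex_lt_toLex]
      left
      rw [hrank a, hrank b, if_pos ((hmemord a).mp ha).1, if_neg (hrestflat b hb)]
      dsimp only
      exact_mod_cast List.idxOf_lt_length_of_mem ((hmemord a).mp ha).1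

-- ===== VERDICT (by name: the statement is the Claim_ definition above) =====
theorem solution_word_rows_spec : Claim_equal_solution_word_rows := by
  intro group_order answer_words_by_level level_to_group_id level_to_group_pos _
  unfold Spec_solution_word_rows solution_word_rows solution_word_rows_alt
  dsimp only
  rw [← List.foldl_map (f := fun group => (PySem.Dict.ofList group).getD "levelIds" ([] : List String)),
      ← List.foldl_flatten]
  rw [pvAB (PySem.Dict.ofList answer_words_by_level)
        (fun lid => pv_level_code lid (PySem.Dict.ofList level_to_group_id) (PySem.Dict.ofList level_to_group_pos)
          :: (PySem.Dict.ofList answer_words_by_level).getD lid [])]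
  simp only [List.nil_append]
  rw [show (PySem.Set.empty : PySem.Set String) = ([] : List String) from rfl]
  rw [pvPair (fun lid => (PySem.Dict.ofList answer_words_by_level).contains lid)]
  dsimp only
  rw [PySem.List.foldl_if_eq_foldl_filter, ← PySem.Set.ofList_eq_foldl]
  rw [pv_flip, PySem.List.foldl_append_if]
  rw [pv_sorted_filter _ (PySem.Dict.nodup_keys_ofList answer_words_by_level)]
  rw [← List.map_append]
  rw [PySem.List.len_eq]
  rw [pvMain ((group_order.map (fun group => (PySem.Dict.ofList group).getD "levelIds" [])).flatten)
        (PySem.Dict.ofList answer_words_by_level).keys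
        (fun lid => (PySem.Dict.ofList answer_words_by_level).contains lid)
        _
        (PySem.Dict.nodup_keys_ofList answer_words_by_level)
        (fun k => (PySem.Dict.contains_iff_mem_keys _ _).symm)
        (fun k => by rw [pvFirstGetD]; simp [PySem.Dict.contains_empty])]
  simp [pv_level_code]
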